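-- pv_equiv track=rewrite | github.com/thezdi/binaryninja | bsdleaks/src/analyzers/helpers.py | get_leaked_bytes
-- ===== SOURCE A (Python) =====
-- def get_leaked_bytes(stores, source, copy_size):
--     memory_access = dict()
--     leaked_bytes = list()
--
--     # create byte map of accessed memory region
--     for offset, store_size in stores.items():
--         for curr_offset in range(offset, offset + store_size):
--             memory_access[curr_offset] = True
--
--     # check the offsets copied against the mapping
--     for curr_offset in range(source, source + copy_size):
--         if curr_offset not in memory_access:
--             leaked_bytes.append(curr_offset)
--
--     return leaked_bytes
-- ===== SOURCE B (Python) =====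
-- def get_leaked_bytes(stores, source, copy_size):
--     # sort the store intervals once, then sweep the copy range with a pointer:
--     # covered runs are skipped in one hop, uncovered runs emitted in one extend
--     ivs = sorted((o, o + s) for o, s in stores.items())
--     n = len(ivs)
--     leaked = []
--     c = source
--     end = source + copy_size
--     i = 0
--     cover = c  # max interval end among starts <= c (c is covered iff cover > c)
--     while c < end:
--         while i < n and ivs[i][0] <= c:
--             if ivs[i][1] > cover:
--                 cover = ivs[i][1]
--             i += 1
--         if cover > c:
--             c = cover
--         else:
--             stop = ivs[i][0] if i < n and ivs[i][0] < end else end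
--             leaked.extend(range(c, stop))
--             c = stop
--     return leaked
-- ===== Notes on version B (the rewrite author's own statement) =====
-- stated objective: alternative
-- what changed: B drops A's per-byte dict expansion of every store interval: it sorts the store intervals by start once and then sweeps the copy range with a pointer, hopping over covered runs in one step and emitting each uncovered run as one block.
import Mathlib
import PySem

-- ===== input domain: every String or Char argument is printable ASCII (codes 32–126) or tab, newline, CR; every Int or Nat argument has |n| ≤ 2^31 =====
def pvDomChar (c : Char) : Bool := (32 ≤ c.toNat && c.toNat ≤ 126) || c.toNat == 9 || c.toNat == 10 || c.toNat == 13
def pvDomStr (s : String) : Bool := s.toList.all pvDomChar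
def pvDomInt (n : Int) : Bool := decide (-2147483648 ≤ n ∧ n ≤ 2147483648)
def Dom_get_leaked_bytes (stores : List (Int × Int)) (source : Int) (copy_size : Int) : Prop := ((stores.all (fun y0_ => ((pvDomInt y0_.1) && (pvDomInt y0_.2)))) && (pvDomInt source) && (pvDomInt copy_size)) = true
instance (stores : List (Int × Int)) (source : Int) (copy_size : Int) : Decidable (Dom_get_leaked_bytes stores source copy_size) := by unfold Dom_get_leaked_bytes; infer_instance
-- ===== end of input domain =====

-- B replaces A's per-byte dict of the store intervals by a sort-then-sweep over the
-- copy range: covered runs are hopped in one step, uncovered runs emitted in one block.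

-- ===== PORT A =====
-- first loop of A: build the byte map of accessed memory
def pvMemoryAccess (stores : List (Int × Int)) : PySem.Dict Int Bool :=
  stores.foldl (fun d p =>
    (PySem.List.pyRange p.1 (p.1 + p.2) 1).foldl (fun d c => d.insert c true) d)
    PySem.Dict.empty

def get_leaked_bytes (stores : List (Int × Int)) (source : Int) (copy_size : Int) : List Int :=
  (PySem.List.pyRange source (source + copy_size) 1).foldl
    (fun acc c => if (pvMemoryAccess stores).contains c then acc else acc ++ [c]) []

-- ===== PORT B =====
-- ivs = sorted((o, o + s) for ...), sorted by interval start
def pvIvs (stores : List (Int × Int)) : List (Int × Int) :=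
  PySem.List.sorted (stores.map (fun p => (p.1, p.1 + p.2))) (fun q => q.1) false

-- the while loop: rs is the unprocessed tail of ivs (the pointer i), cover the
-- farthest end among processed starts ≤ c; terminates since c or the pointer advances
def pvSweep (rs : List (Int × Int)) (cover c e : Int) : List Int :=
  if hce : c < e then
    match rs with
    | (lo, hi) :: t =>
        if hlo : lo ≤ c then pvSweep t (max cover hi) c e
        else if hcov : cover > c then pvSweep ((lo, hi) :: t) cover cover e
        else
          PySem.List.pyRange c (if lo < e then lo else e) 1 ++
            pvSweep ((lo, hi) :: t) cover (if lo < e then lo else e) e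
    | [] =>
        if hcov : cover > c then pvSweep [] cover cover e
        else PySem.List.pyRange c e 1
  else []
termination_by (e - c).toNat + rs.length
decreasing_by
  · simp only [List.length_cons]; omega
  · simp only [List.length_cons]; omega
  · simp only [List.length_cons]; split_ifs <;> omega
  · simp only [List.length_nil]; omega

def get_leaked_bytes_alt (stores : List (Int × Int)) (source : Int) (copy_size : Int) : List Int :=
  pvSweep (pvIvs stores) source source (source + copy_size)

-- ===== PRECONDITION & SPEC =====
def Spec_get_leaked_bytes (stores : List (Int × Int)) (source : Int) (copy_size : Int) (out : List Int) : Prop := out = get_leaked_bytes_alt stores source copy_size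
instance (stores : List (Int × Int)) (source : Int) (copy_size : Int) (out : List Int) : Decidable (Spec_get_leaked_bytes stores source copy_size out) := by unfold Spec_get_leaked_bytes; infer_instance

-- ===== CLAIM (what is proved, stated in full; the proofs are below) =====
def Claim_equal_get_leaked_bytes : Prop := ∀ (stores : List (Int × Int)) (source : Int) (copy_size : Int), Dom_get_leaked_bytes stores source copy_size → Spec_get_leaked_bytes stores source copy_size (get_leaked_bytes stores source copy_size)

-- ===== LEMMAS AND PROOFS =====

-- abstract coverage predicate both sides are reduced to
def pvCovered (stores : List (Int × Int)) (c : Int) : Bool :=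
  stores.any (fun p => decide (p.1 ≤ c) && decide (c < p.1 + p.2))

-- ---- A-side: dict membership after the marking loops is interval coverage ----
theorem contains_foldl_insert_true (l : List Int) (d : PySem.Dict Int Bool) (x : Int) :
    (l.foldl (fun d c => d.insert c true) d).contains x = (decide (x ∈ l) || d.contains x) := by
  induction l generalizing d with
  | nil => simp
  | cons h t ih =>
      simp only [List.foldl_cons, ih, PySem.Dict.contains_insert, List.mem_cons]
      by_cases hx : x = h <;> simp [hx, beq_iff_eq, Bool.or_left_comm]

theorem contains_buildMap (stores : List (Int × Int)) (d : PySem.Dict Int Bool) (x : Int) :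
    (stores.foldl (fun d p =>
        (PySem.List.pyRange p.1 (p.1 + p.2) 1).foldl (fun d c => d.insert c true) d) d).contains x
      = (pvCovered stores x || d.contains x) := by
  induction stores generalizing d with
  | nil => simp [pvCovered]
  | cons p t ih =>
      simp only [List.foldl_cons, ih, contains_foldl_insert_true, PySem.List.mem_pyRange_one,
        pvCovered, List.any_cons]
      simp [Bool.or_comm, Bool.or_left_comm, Bool.or_assoc]

-- so A is the filter of the copy range by non-coverage
theorem A_eq_filter (stores : List (Int × Int)) (source copy_size : Int) :
    get_leaked_bytes stores source copy_size
      = (PySem.List.pyRange source (source + copy_size) 1).filter (fun c => !pvCovered stores c) := by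
  unfold get_leaked_bytes
  have hswap : (fun (acc : List Int) c => if (pvMemoryAccess stores).contains c = true then acc else acc ++ [c])
      = (fun (acc : List Int) c => if !(pvMemoryAccess stores).contains c then acc ++ [c] else acc) := by
    funext acc c; by_cases h : (pvMemoryAccess stores).contains c <;> simp [h]
  rw [hswap, PySem.List.foldl_append_if_eq_filter]
  simp only [List.nil_append]
  apply List.filter_congr
  intro c _
  simp [pvMemoryAccess, contains_buildMap]

-- ---- B-side ----
-- a run of covered offsets contributes nothing to the filter
theorem filter_skip_covered (stores : List (Int × Int)) (c j e : Int)
    (hcj : c ≤ j)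
    (hcov : ∀ x, c ≤ x → x < j → pvCovered stores x = true) :
    (PySem.List.pyRange c e 1).filter (fun x => !pvCovered stores x)
      = (PySem.List.pyRange j e 1).filter (fun x => !pvCovered stores x) := by
  generalize hk : (j - c).toNat = k
  induction k generalizing c with
  | zero =>
      have : j = c := by omega
      rw [this]
  | succ n ih =>
      have hcj' : c < j := by omega
      by_cases hce : c < e
      · rw [PySem.List.pyRange_one_cons hce]
        rw [List.filter_cons, if_neg (by simp [hcov c le_rfl hcj'])]
        exact ih (c + 1) (by omega) (fun x h1 h2 => hcov x (by omega) h2) (by omega)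
      · rw [PySem.List.pyRange_one_eq_nil (by omega), PySem.List.pyRange_one_eq_nil (by omega)]

-- a run of uncovered offsets is emitted verbatim by the filter
theorem filter_emit_uncovered (stores : List (Int × Int)) (c j e : Int)
    (h1 : c ≤ j) (h2 : j ≤ e)
    (hunc : ∀ x, c ≤ x → x < j → pvCovered stores x = false) :
    (PySem.List.pyRange c e 1).filter (fun x => !pvCovered stores x)
      = PySem.List.pyRange c j 1 ++ (PySem.List.pyRange j e 1).filter (fun x => !pvCovered stores x) := by
  rw [PySem.List.pyRange_one_append c j e h1 h2, List.filter_append]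
  congr 1
  apply List.filter_eq_self.mpr
  intro x hx
  rw [PySem.List.mem_pyRange_one] at hx
  simp [hunc x hx.1 hx.2]

-- the sweep loop invariant: coverage of any x ≥ c is "x < cover, or some
-- unprocessed interval covers x"
theorem sweep_eq_filter (stores : List (Int × Int)) (rs : List (Int × Int)) (cover c e : Int)
    (hs : rs.Pairwise (fun a b => a.1 ≤ b.1))
    (hcc : ∀ x : Int, c ≤ x → (pvCovered stores x = true ↔ (x < cover ∨ ∃ p ∈ rs, p.1 ≤ x ∧ x < p.2))) :
    pvSweep rs cover c e = (PySem.List.pyRange c e 1).filter (fun x => !pvCovered stores x) := by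
  generalize hk : (e - c).toNat + rs.length = k
  induction k using Nat.strong_induction_on generalizing rs cover c with
  | _ k ih =>
      rw [pvSweep.eq_def]
      by_cases hce : c < e
      · rw [dif_pos hce]
        match rs, hs, hcc, hk with
        | (lo, hi) :: t, hs, hcc, hk =>
          simp only []
          by_cases hlo : lo ≤ c
          · rw [dif_pos hlo]
            refine ih ((e - c).toNat + t.length) (by simp at hk; omega) t (max cover hi) c
              ((List.pairwise_cons.mp hs).2) ?_ rfl
            intro x hx
            rw [hcc x hx]
            constructor
            · rintro (h | ⟨p, hp, hp1, hp2⟩)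
              · left; omega
              · rcases List.mem_cons.mp hp with rfl | hp'
                · left; simp only at hp2; omega
                · exact Or.inr ⟨p, hp', hp1, hp2⟩
            · rintro (h | ⟨p, hp, hp1, hp2⟩)
              · by_cases hc : x < cover
                · exact Or.inl hc
                · exact Or.inr ⟨(lo, hi), List.mem_cons_self, by omega, by simp; omega⟩
              · exact Or.inr ⟨p, List.mem_cons_of_mem _ hp, hp1, hp2⟩
          · rw [dif_neg hlo]
            by_cases hcov : cover > c
            · rw [dif_pos hcov]
              rw [ih ((e - cover).toNat + ((lo, hi) :: t).length) (by simp at hk ⊢; omega)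
                ((lo, hi) :: t) cover cover ?_ ?_ rfl]
              · exact (filter_skip_covered stores c cover e (by omega)
                  (fun x hx1 hx2 => (hcc x hx1).mpr (Or.inl hx2))).symm
              · exact hs
              · exact fun x hx => hcc x (by omega)
            · rw [dif_neg hcov]
              have hstop1 : c < (if lo < e then lo else e) := by split_ifs <;> omega
              have hstop2 : (if lo < e then lo else e) ≤ e := by split_ifs <;> omega
              have hstoplo : (if lo < e then lo else e) ≤ lo := by split_ifs <;> omega
              have hunc : ∀ x, c ≤ x → x < (if lo < e then lo else e) → pvCovered stores x = false := by
                intro x hx1 hx2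
                cases h : pvCovered stores x with
                | false => rfl
                | true =>
                    rcases (hcc x hx1).mp h with h' | ⟨p, hp, hp1, hp2⟩
                    · omega
                    · rcases List.mem_cons.mp hp with rfl | hp'
                      · simp only at hp1; omega
                      · have : lo ≤ p.1 := (List.pairwise_cons.mp hs).1 p hp'
                        omega
              rw [ih ((e - (if lo < e then lo else e)).toNat + ((lo, hi) :: t).length)
                (by simp at hk ⊢; omega) ((lo, hi) :: t) cover (if lo < e then lo else e)
                hs (fun x hx => hcc x (by omega)) rfl]
              exact (filter_emit_uncovered stores c (if lo < e then lo else e) e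
                (by omega) hstop2 hunc).symm
        | [], hs, hcc, hk =>
          simp only []
          by_cases hcov : cover > c
          · rw [dif_pos hcov]
            rw [ih ((e - cover).toNat + ([] : List (Int × Int)).length) (by simp at hk ⊢; omega)
              [] cover cover hs (fun x hx => hcc x (by omega)) rfl]
            exact (filter_skip_covered stores c cover e (by omega)
              (fun x hx1 hx2 => (hcc x hx1).mpr (Or.inl hx2))).symm
          · rw [dif_neg hcov]
            symm
            apply List.filter_eq_self.mpr
            intro x hx
            rw [PySem.List.mem_pyRange_one] at hx
            cases h : pvCovered stores x with
            | false => rfl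
            | true =>
                rcases (hcc x hx.1).mp h with h' | ⟨p, hp, _, _⟩
                · omega
                · simp at hp
      · rw [dif_neg hce, PySem.List.pyRange_one_eq_nil (by omega)]
        simp

-- B equals the same filter
theorem B_eq_filter (stores : List (Int × Int)) (source copy_size : Int) :
    get_leaked_bytes_alt stores source copy_size
      = (PySem.List.pyRange source (source + copy_size) 1).filter (fun x => !pvCovered stores x) := by
  unfold get_leaked_bytes_alt pvIvs
  apply sweep_eq_filter
  · exact PySem.List.sorted_pairwise _ _
  · intro x hx
    constructor
    · intro h
      simp only [pvCovered, List.any_eq_true, Bool.and_eq_true, decide_eq_true_eq] at h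
      obtain ⟨p, hp, h1, h2⟩ := h
      exact Or.inr ⟨(p.1, p.1 + p.2),
        (PySem.List.mem_sorted _ _ _ _).mpr (List.mem_map_of_mem hp), h1, h2⟩
    · rintro (h | ⟨q, hq, h1, h2⟩)
      · omega
      · rw [PySem.List.mem_sorted] at hq
        obtain ⟨p, hp, rfl⟩ := List.mem_map.mp hq
        simp only [pvCovered, List.any_eq_true, Bool.and_eq_true, decide_eq_true_eq]
        exact ⟨p, hp, h1, h2⟩

-- ===== VERDICT (by name: the statement is the Claim_ definition above) =====
theorem get_leaked_bytes_spec : Claim_equal_get_leaked_bytes := by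
  intro stores source copy_size _
  show get_leaked_bytes stores source copy_size = get_leaked_bytes_alt stores source copy_size
  rw [A_eq_filter, B_eq_filter]
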